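-- pv_equiv track=rewrite | github.com/gameupyourlife/HoI4-Modding-Tools | HoI4 Bulk Resource Remove Tool.py | CommentOutLineInsideBracketIndex
-- ===== SOURCE A (Python) =====
-- def CommentOutLineInsideBracketIndex(lines, index):
--     nestIndex = 0
--     line = lines[index]
--     lines[index] = "# " + lines[index]
--     if isInLineAndNoteCommeted(line, "{"):
--         nestIndex += 1
--     if  isInLineAndNoteCommeted(line, "}"):
--         nestIndex -= 1
--     index += 1
--     while nestIndex > 0:
--         line = lines[index]
--         lines[index] = "# " + lines[index]
--         if isInLineAndNoteCommeted(line, "{"):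
--             nestIndex += 1
--         if  isInLineAndNoteCommeted(line, "}"):
--             nestIndex -= 1
--         index += 1
--     return (line, lines, index)
--
-- def isInLineAndNoteCommeted(line, search_term):
--     # Check whether the line contains the search term and is not in a comment
--     index = line.find(search_term)
--     commentIndex = line.find("#")
--     if index != -1 and ((commentIndex > index) or (commentIndex == -1)):
--         return True
--     return False
-- ===== SOURCE B (Python) =====
-- # Two-pass re-implementation: first scan for the end of the brace block, then comment the range.
-- # Like A, it mutates `lines` in place (same "# " prefixes) and raises IndexError on an unterminated block.
-- def CommentOutLineInsideBracketIndex(lines, index):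
--     # Pass 1: scan forward from `index`, tracking brace nesting on the original text,
--     # until nesting first drops to 0 or below after a line.
--     nest = 0
--     end = index
--     while True:
--         line = lines[end]
--         if _uncommented_hit(line, "{"):
--             nest += 1
--         if _uncommented_hit(line, "}"):
--             nest -= 1
--         end += 1
--         if nest <= 0:
--             break
--     # Pass 2: comment out every scanned line.
--     for i in range(index, end):
--         lines[i] = "# " + lines[i]
--     return (line, lines, end)
--
-- def _uncommented_hit(line, search_term):
--     pos = line.find(search_term)
--     comment = line.find("#")
--     return pos != -1 and (comment > pos or comment == -1)
-- ===== Notes on version B (the rewrite author's own statement) =====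
-- stated objective: alternative
-- what changed: A interleaves brace-tracking and mutation in one while loop that comments each line as it scans; B decomposes the task into two passes: a pure forward scan over the original text that only finds the end of the brace block, then a separate pass that comments out the whole range at once.
import Mathlib
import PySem

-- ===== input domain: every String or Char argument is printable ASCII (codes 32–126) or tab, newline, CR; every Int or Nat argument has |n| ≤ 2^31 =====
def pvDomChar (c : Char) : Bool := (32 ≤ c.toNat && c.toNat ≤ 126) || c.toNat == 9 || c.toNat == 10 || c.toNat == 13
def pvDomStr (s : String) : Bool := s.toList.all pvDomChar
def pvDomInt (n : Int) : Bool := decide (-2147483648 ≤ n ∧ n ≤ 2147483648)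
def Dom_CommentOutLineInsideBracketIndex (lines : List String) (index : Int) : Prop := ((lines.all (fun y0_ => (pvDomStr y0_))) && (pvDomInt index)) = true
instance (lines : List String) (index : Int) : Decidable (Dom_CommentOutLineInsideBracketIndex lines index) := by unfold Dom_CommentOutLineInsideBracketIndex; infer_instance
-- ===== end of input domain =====

-- B re-implements the same in-place block commenting in two passes (scan for the block end,
-- then comment the range); same return value and same in-place "# " mutation of `lines` as A.

-- ===== PORT A =====
-- helper isInLineAndNoteCommeted, as in the Python module
def isInLineAndNoteCommeted (line : String) (searchTerm : String) : Bool :=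
  let index := PySem.Str.find line searchTerm
  let commentIndex := PySem.Str.find line "#"
  if index ≠ -1 ∧ (commentIndex > index ∨ commentIndex = -1) then true else false

-- the `while nestIndex > 0` loop of A; fuel only makes the recursion total
-- (the `none`/fuel-out branches are Python's IndexError, excluded by Pre_)
def pvALoop : Nat → List String → Int → Int → String → String × List String × Int
  | 0, ls, _, i, line => (line, ls, i)
  | f + 1, ls, nest, i, line =>
    if 0 < nest then
      match PySem.List.pyGet? ls i with
      | none => (line, ls, i)
      | some l =>
        let ls' := PySem.List.pySetD ls i ("# " ++ l)
        let n1 := if isInLineAndNoteCommeted l "{" then nest + 1 else nest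
        let n2 := if isInLineAndNoteCommeted l "}" then n1 - 1 else n1
        pvALoop f ls' n2 (i + 1) l
    else (line, ls, i)

def CommentOutLineInsideBracketIndex (lines : List String) (index : Int) : String × List String × Int :=
  match PySem.List.pyGet? lines index with
  | none => ("", lines, index)   -- IndexError in Python, excluded by Pre_
  | some line =>
    let lines1 := PySem.List.pySetD lines index ("# " ++ line)
    let n1 : Int := if isInLineAndNoteCommeted line "{" then 1 else 0
    let n2 : Int := if isInLineAndNoteCommeted line "}" then n1 - 1 else n1
    pvALoop (2 * lines.length + 1) lines1 n2 (index + 1) line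

-- ===== PORT B =====
-- helper _uncommented_hit of Source B
def pvUncommentedHit (line : String) (searchTerm : String) : Bool :=
  let pos := PySem.Str.find line searchTerm
  let comment := PySem.Str.find line "#"
  if pos ≠ -1 ∧ (comment > pos ∨ comment = -1) then true else false

-- pass 1 of Source B: scan for the end of the block (none = Python's IndexError, excluded by Pre_)
def pvBScan : Nat → List String → Int → Int → Option (String × Int)
  | 0, _, _, _ => none
  | f + 1, ls, nest, e =>
    match PySem.List.pyGet? ls e with
    | none => none
    | some line =>
      let n1 := if pvUncommentedHit line "{" then nest + 1 else nest
      let n2 := if pvUncommentedHit line "}" then n1 - 1 else n1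
      if n2 ≤ 0 then some (line, e + 1) else pvBScan f ls n2 (e + 1)

-- pass 2 of Source B: `for i in range(index, end): lines[i] = "# " + lines[i]`
def pvCStep (ls : List String) (i : Int) : List String :=
  match PySem.List.pyGet? ls i with
  | some l => PySem.List.pySetD ls i ("# " ++ l)
  | none => ls

def pvCommentPass (lines : List String) (a e : Int) : List String :=
  (PySem.List.pyRange a e).foldl pvCStep lines

def CommentOutLineInsideBracketIndex_alt (lines : List String) (index : Int) : String × List String × Int :=
  match pvBScan (2 * lines.length + 2) lines 0 index with
  | some (line, e) => (line, pvCommentPass lines index e, e)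
  | none => ("", lines, index)   -- IndexError in Python, excluded by Pre_

-- ===== PRECONDITION & SPEC =====
-- net brace-nesting change contributed by line i (0 braces in comments), on the ORIGINAL text
def pvDelta (lines : List String) (i : Int) : Int :=
  match PySem.List.pyGet? lines i with
  | some l => (if isInLineAndNoteCommeted l "{" then 1 else 0) - (if isInLineAndNoteCommeted l "}" then 1 else 0)
  | none => 0

def pvSum (lines : List String) (cur : Int) : Nat → Int
  | 0 => pvDelta lines cur
  | k + 1 => pvDelta lines cur + pvSum lines (cur + 1) k

-- Pre_: the start index is a valid Python index and the nesting count drops to ≤ 0 at some line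
-- the scan can reach before wrapping past the end of the list — exactly the inputs on which the
-- Python A returns instead of raising IndexError.
def Pre_CommentOutLineInsideBracketIndex (lines : List String) (index : Int) : Prop :=
  -(lines.length : Int) ≤ index ∧ index < (lines.length : Int) ∧
  ∃ k ∈ List.range lines.length,
    index + (k : Int) < (lines.length : Int) + min index 0 ∧ pvSum lines index k ≤ 0

instance (lines : List String) (index : Int) : Decidable (Pre_CommentOutLineInsideBracketIndex lines index) := by
  unfold Pre_CommentOutLineInsideBracketIndex; infer_instance

def pvWitness_CommentOutLineInsideBracketIndex : List String × Int := (["a = { ", "}"], 0)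

def Spec_CommentOutLineInsideBracketIndex (lines : List String) (index : Int) (out : String × List String × Int) : Prop := out = CommentOutLineInsideBracketIndex_alt lines index
instance (lines : List String) (index : Int) (out : String × List String × Int) : Decidable (Spec_CommentOutLineInsideBracketIndex lines index out) := by unfold Spec_CommentOutLineInsideBracketIndex; infer_instance

-- ===== CLAIM (what is proved, stated in full; the proofs are below) =====
def Claim_equal_CommentOutLineInsideBracketIndex : Prop := ∀ (lines : List String) (index : Int), Dom_CommentOutLineInsideBracketIndex lines index → Pre_CommentOutLineInsideBracketIndex lines index → Spec_CommentOutLineInsideBracketIndex lines index (CommentOutLineInsideBracketIndex lines index)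

-- ===== LEMMAS AND PROOFS =====

-- the position of `xs[i]` as a Nat offset (Python's negative-index rule)
def pvNorm (n : Nat) (i : Int) : Nat := (if i < 0 then i + n else i).toNat

lemma pvIdx_norm (n : Nat) (i : Int) (h1 : -(n : Int) ≤ i) (h2 : i < (n : Int)) :
    PySem.List.pyIdx? n i = some (pvNorm n i) := by
  simp only [PySem.List.pyIdx?, pvNorm]
  split_ifs <;> simp <;> omega

lemma pvGet_norm (xs : List String) (i : Int) (h1 : -(xs.length : Int) ≤ i) (h2 : i < (xs.length : Int)) :
    PySem.List.pyGet? xs i = xs[pvNorm xs.length i]? := by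
  simp [PySem.List.pyGet?, pvIdx_norm xs.length i h1 h2]

lemma pvSet_norm (xs : List String) (i : Int) (v : String) (h1 : -(xs.length : Int) ≤ i) (h2 : i < (xs.length : Int)) :
    PySem.List.pySetD xs i v = xs.set (pvNorm xs.length i) v := by
  simp [PySem.List.pySetD, PySem.List.pySet?, pvIdx_norm xs.length i h1 h2]

-- reading at a different (normalized) position than the one written
lemma pvGS (xs : List String) (j i : Int) (v : String)
    (hj1 : -(xs.length : Int) ≤ j) (hj2 : j < (xs.length : Int))
    (hi1 : -(xs.length : Int) ≤ i) (hi2 : i < (xs.length : Int))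
    (hne : pvNorm xs.length j ≠ pvNorm xs.length i) :
    PySem.List.pyGet? (PySem.List.pySetD xs j v) i = PySem.List.pyGet? xs i := by
  rw [pvSet_norm xs j v hj1 hj2]
  rw [pvGet_norm xs i hi1 hi2]
  rw [pvGet_norm (xs.set (pvNorm xs.length j) v) i (by simpa using hi1) (by simpa using hi2)]
  simp only [List.length_set]
  exact List.getElem?_set_ne hne

lemma pvALoop_nonpos (f : Nat) (ls : List String) (nest i : Int) (l : String) (h : nest ≤ 0) :
    pvALoop f ls nest i l = (l, ls, i) := by
  cases f
  · rfl
  · simp [pvALoop, show ¬ 0 < nest by omega]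

lemma pvBScan_lb (f : Nat) : ∀ (ls : List String) (nest cur : Int) (l : String) (e : Int),
    pvBScan f ls nest cur = some (l, e) → cur < e := by
  induction f with
  | zero => intro ls nest cur l e h; simp [pvBScan] at h
  | succ f ih =>
    intro ls nest cur l e h
    simp only [pvBScan] at h
    cases hg : PySem.List.pyGet? ls cur with
    | none => rw [hg] at h; simp at h
    | some line =>
      rw [hg] at h
      simp only at h
      set n1 := (if pvUncommentedHit line "{" = true then nest + 1 else nest) with hn1
      set n2 := (if pvUncommentedHit line "}" = true then n1 - 1 else n1) with hn2
      by_cases hc : n2 ≤ 0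
      · rw [if_pos hc] at h; simp at h; omega
      · rw [if_neg hc] at h; have := ih ls n2 (cur + 1) l e h; omega

lemma pvFoldl_len (is : List Int) : ∀ (ls : List String), (is.foldl pvCStep ls).length = ls.length := by
  induction is with
  | nil => intro ls; rfl
  | cons i is ih =>
    intro ls
    simp only [List.foldl_cons]
    rw [ih]
    unfold pvCStep
    cases hg : PySem.List.pyGet? ls i <;> simp [PySem.List.length_pySetD]

lemma pvCP_len (lines : List String) (a e : Int) : (pvCommentPass lines a e).length = lines.length := by
  unfold pvCommentPass; exact pvFoldl_len _ _

lemma pvCP_zero (lines : List String) (a : Int) : pvCommentPass lines a a = lines := by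
  unfold pvCommentPass
  rw [PySem.List.pyRange_one]
  simp

lemma pvCP_get (lines : List String) (index : Int) :
    ∀ (m : Nat) (i : Int), index + m ≤ i → i < index + lines.length →
      PySem.List.pyGet? (pvCommentPass lines index (index + m)) i = PySem.List.pyGet? lines i := by
  intro m
  induction m with
  | zero => intro i _ _; rw [show index + ((0:Nat):Int) = index by omega, pvCP_zero]
  | succ m ih =>
    intro i hlo hhi
    have hcast : index + ((m+1 : Nat) : Int) = (index + m) + 1 := by push_cast; ring
    rw [hcast]
    unfold pvCommentPass
    rw [PySem.List.pyRange_one_succ_right (by omega : index ≤ index + (m:Int))]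
    rw [List.foldl_append]
    have hstep : (PySem.List.pyRange index (index + (m:Int))).foldl pvCStep lines = pvCommentPass lines index (index + (m:Int)) := rfl
    rw [hstep]
    simp only [List.foldl_cons, List.foldl_nil]
    have hrd : PySem.List.pyGet? (pvCommentPass lines index (index + (m:Int))) (index + (m:Int)) = PySem.List.pyGet? lines (index + (m:Int)) := by
      exact ih (index + (m:Int)) (by omega) (by omega)
    unfold pvCStep
    rw [hrd]
    cases hg : PySem.List.pyGet? lines (index + (m:Int)) with
    | none => exact ih i (by omega) hhi
    | some l =>
      -- the written position index+m is a valid index, i may or may not be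
      have hjr : -(lines.length:Int) ≤ index + (m:Int) ∧ index + (m:Int) < lines.length := by
        have := (PySem.List.pyGet?_eq_none_iff lines (index + (m:Int))).mpr
        by_contra hc
        rw [(PySem.List.pyGet?_eq_none_iff lines (index + (m:Int))).mpr (fun hr => hc ⟨hr.1, hr.2⟩)] at hg
        simp at hg
      by_cases hir : -(lines.length:Int) ≤ i ∧ i < lines.length
      · have hL := pvCP_len lines index (index + (m:Int))
        rw [pvGS (pvCommentPass lines index (index + (m:Int))) (index + (m:Int)) i _ (by rw [hL]; omega) (by rw [hL]; omega) (by rw [hL]; omega) (by rw [hL]; omega) ?hne]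
        · exact ih i (by omega) hhi
        case hne =>
          rw [hL]
          unfold pvNorm
          split_ifs <;> omega
      · -- i out of range: both sides are none
        have h2 : PySem.List.pyGet? lines i = none := by
          rw [PySem.List.pyGet?_eq_none_iff]; intro hr; exact hir ⟨hr.1, hr.2⟩
        rw [h2, PySem.List.pyGet?_eq_none_iff]
        intro hr
        have hL1 := PySem.List.length_pySetD (pvCommentPass lines index (index + (m:Int))) (index + (m:Int)) ("# " ++ l)
        have hL2 := pvCP_len lines index (index + (m:Int))
        rw [hL1, hL2] at hr
        exact hir ⟨hr.1, hr.2⟩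

lemma pvCP_succ (lines : List String) (index : Int)
    (m : Nat) (l : String) (hm : index + m < (lines.length : Int) + min index 0)
    (hg : PySem.List.pyGet? lines (index + m) = some l) :
    pvCommentPass lines index (index + m + 1)
      = PySem.List.pySetD (pvCommentPass lines index (index + m)) (index + m) ("# " ++ l) := by
  unfold pvCommentPass
  rw [PySem.List.pyRange_one_succ_right (by omega : index ≤ index + (m:Int))]
  rw [List.foldl_append]
  simp only [List.foldl_cons, List.foldl_nil]
  have hstep : (PySem.List.pyRange index (index + (m:Int))).foldl pvCStep lines = pvCommentPass lines index (index + (m:Int)) := rfl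
  rw [hstep]
  have hrd : PySem.List.pyGet? (pvCommentPass lines index (index + (m:Int))) (index + (m:Int)) = PySem.List.pyGet? lines (index + (m:Int)) :=
    pvCP_get lines index m (index + (m:Int)) (by omega) (by omega)
  unfold pvCStep
  rw [hrd, hg]

lemma pvHit_eq (line t : String) : pvUncommentedHit line t = isInLineAndNoteCommeted line t := rfl

lemma pvScan_stops (lines : List String) :
    ∀ (k f : Nat) (nest cur : Int), k + 1 ≤ f → -(lines.length : Int) ≤ cur →
      cur + k < (lines.length : Int) → nest + pvSum lines cur k ≤ 0 →
      ∃ l e, pvBScan f lines nest cur = some (l, e) ∧ e ≤ cur + k + 1 := by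
  intro k
  induction k with
  | zero =>
    intro f nest cur hf h2 h3 h4
    obtain ⟨f', rfl⟩ : ∃ f', f = f' + 1 := ⟨f - 1, by omega⟩
    obtain ⟨l, hg⟩ : ∃ l, PySem.List.pyGet? lines cur = some l := by
      cases hgx : PySem.List.pyGet? lines cur with
      | none => rw [PySem.List.pyGet?_eq_none_iff] at hgx; exact absurd ⟨by omega, by omega⟩ hgx
      | some l => exact ⟨l, rfl⟩
    have hδ : pvDelta lines cur = (if isInLineAndNoteCommeted l "{" then 1 else 0) - (if isInLineAndNoteCommeted l "}" then 1 else 0) := by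
      unfold pvDelta; rw [hg]
    simp only [pvBScan]
    rw [hg]
    simp only
    set n1 := (if pvUncommentedHit l "{" = true then nest + 1 else nest) with hn1
    set n2 := (if pvUncommentedHit l "}" = true then n1 - 1 else n1) with hn2
    have hn2d : n2 = nest + pvDelta lines cur := by
      rw [hδ, hn2, hn1]; simp only [pvHit_eq]; split_ifs <;> ring
    have hc : n2 ≤ 0 := by
      have := h4; unfold pvSum at this; omega
    rw [if_pos hc]
    exact ⟨l, cur + 1, rfl, by push_cast; omega⟩
  | succ k ih =>
    intro f nest cur hf h2 h3 h4
    obtain ⟨f', rfl⟩ : ∃ f', f = f' + 1 := ⟨f - 1, by omega⟩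
    obtain ⟨l, hg⟩ : ∃ l, PySem.List.pyGet? lines cur = some l := by
      cases hgx : PySem.List.pyGet? lines cur with
      | none => rw [PySem.List.pyGet?_eq_none_iff] at hgx; exact absurd ⟨by omega, by push_cast at h3 ⊢; omega⟩ hgx
      | some l => exact ⟨l, rfl⟩
    have hδ : pvDelta lines cur = (if isInLineAndNoteCommeted l "{" then 1 else 0) - (if isInLineAndNoteCommeted l "}" then 1 else 0) := by
      unfold pvDelta; rw [hg]
    simp only [pvBScan]
    rw [hg]
    simp only
    set n1 := (if pvUncommentedHit l "{" = true then nest + 1 else nest) with hn1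
    set n2 := (if pvUncommentedHit l "}" = true then n1 - 1 else n1) with hn2
    have hn2d : n2 = nest + pvDelta lines cur := by
      rw [hδ, hn2, hn1]; simp only [pvHit_eq]; split_ifs <;> ring
    by_cases hc : n2 ≤ 0
    · rw [if_pos hc]
      exact ⟨l, cur + 1, rfl, by push_cast; omega⟩
    · rw [if_neg hc]
      have hsum : pvSum lines cur (k + 1) = pvDelta lines cur + pvSum lines (cur + 1) k := rfl
      obtain ⟨l', e, hscan, he⟩ := ih f' n2 (cur + 1) (by omega) (by omega)
        (by push_cast at h3 ⊢; omega) (by rw [hn2d]; rw [hsum] at h4; omega)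
      exact ⟨l', e, hscan, by push_cast at he ⊢; omega⟩

lemma pvAlign (lines : List String) (index : Int) :
    ∀ (f : Nat) (nest : Int) (m : Nat) (l0 lout : String) (e : Int),
      0 < nest →
      pvBScan f lines nest (index + m) = some (lout, e) →
      e ≤ (lines.length : Int) + min index 0 →
      pvALoop f (pvCommentPass lines index (index + m)) nest (index + m) l0
        = (lout, pvCommentPass lines index e, e) := by
  intro f
  induction f with
  | zero => intro nest m l0 lout e _ hscan _; simp [pvBScan] at hscan
  | succ f ih =>
    intro nest m l0 lout e hpos hscan he
    have hlb := pvBScan_lb (f + 1) lines nest (index + m) lout e hscan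
    have hm_lt : index + (m:Int) < (lines.length : Int) + min index 0 := lt_of_lt_of_le hlb he
    simp only [pvBScan] at hscan
    cases hg : PySem.List.pyGet? lines (index + (m:Int)) with
    | none => rw [hg] at hscan; simp at hscan
    | some l1 =>
    rw [hg] at hscan
    simp only at hscan
    set n1 := (if pvUncommentedHit l1 "{" = true then nest + 1 else nest) with hn1
    set n2 := (if pvUncommentedHit l1 "}" = true then n1 - 1 else n1) with hn2
    have hrd : PySem.List.pyGet? (pvCommentPass lines index (index + (m:Int))) (index + (m:Int)) = some l1 := by
      rw [pvCP_get lines index m (index + (m:Int)) (by omega) (by omega)]; exact hg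
    have hset : PySem.List.pySetD (pvCommentPass lines index (index + (m:Int))) (index + (m:Int)) ("# " ++ l1)
        = pvCommentPass lines index (index + ((m + 1 : Nat) : Int)) := by
      rw [show (index + ((m + 1 : Nat) : Int)) = index + (m:Int) + 1 by push_cast; ring]
      exact (pvCP_succ lines index m l1 hm_lt hg).symm
    simp only [pvALoop, if_pos hpos, hrd]
    have hnA : (if isInLineAndNoteCommeted l1 "}" = true then (if isInLineAndNoteCommeted l1 "{" = true then nest + 1 else nest) - 1 else (if isInLineAndNoteCommeted l1 "{" = true then nest + 1 else nest)) = n2 := by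
      rw [hn2, hn1]; simp only [pvHit_eq]; rfl
    rw [hnA, hset]
    by_cases hc : n2 ≤ 0
    · rw [if_pos hc] at hscan
      simp only [Option.some.injEq, Prod.mk.injEq] at hscan
      obtain ⟨rfl, rfl⟩ := hscan
      rw [pvALoop_nonpos f _ n2 _ l1 hc]
      rw [show (index + ((m + 1 : Nat) : Int)) = index + (m:Int) + 1 by push_cast; ring]
    · rw [if_neg hc] at hscan
      have hscan' : pvBScan f lines n2 (index + ((m + 1 : Nat) : Int)) = some (lout, e) := by
        rw [show (index + ((m + 1 : Nat) : Int)) = index + (m:Int) + 1 by push_cast; ring]; exact hscan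
      rw [show (index + (m:Int) + 1) = index + ((m + 1 : Nat) : Int) by push_cast; ring]
      exact ih n2 (m + 1) l1 lout e (by omega) hscan' he

-- ===== VERDICT (by name: the statement is the Claim_ definition above) =====
theorem CommentOutLineInsideBracketIndex_spec : Claim_equal_CommentOutLineInsideBracketIndex := by
  intro lines index _ hPre
  obtain ⟨h1, h2, k, hk, hb, hs⟩ := hPre
  have hkl : k < lines.length := List.mem_range.mp hk
  obtain ⟨lout, e, hscan, he'⟩ := pvScan_stops lines k (2 * lines.length + 2) 0 index
    (by omega) h1 (by omega) (by simpa using hs)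
  have he : e ≤ (lines.length : Int) + min index 0 := by omega
  unfold Spec_CommentOutLineInsideBracketIndex
  unfold CommentOutLineInsideBracketIndex_alt
  rw [hscan]
  obtain ⟨F', hF⟩ : ∃ F', 2 * lines.length + 2 = F' + 1 := ⟨2 * lines.length + 1, by omega⟩
  rw [hF] at hscan
  simp only [pvBScan] at hscan
  obtain ⟨line0, hg0⟩ : ∃ l, PySem.List.pyGet? lines index = some l := by
    cases hgx : PySem.List.pyGet? lines index with
    | none => rw [PySem.List.pyGet?_eq_none_iff] at hgx; exact absurd ⟨h1, h2⟩ hgx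
    | some l => exact ⟨l, rfl⟩
  rw [hg0] at hscan
  simp only at hscan
  set n1 := (if pvUncommentedHit line0 "{" = true then (0:Int) + 1 else 0) with hn1
  set n2 := (if pvUncommentedHit line0 "}" = true then n1 - 1 else n1) with hn2
  unfold CommentOutLineInsideBracketIndex
  rw [hg0]
  simp only
  have hnA : (if isInLineAndNoteCommeted line0 "}" = true then (if isInLineAndNoteCommeted line0 "{" = true then (1:Int) else 0) - 1 else (if isInLineAndNoteCommeted line0 "{" = true then (1:Int) else 0)) = n2 := by
    rw [hn2, hn1]; simp only [pvHit_eq]; split_ifs <;> ring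
  rw [hnA]
  have hm0 : index + ((0:Nat):Int) < (lines.length : Int) + min index 0 := by simp; omega
  have h00 : (index + ((0:Nat):Int)) = index := by push_cast; ring
  have hset1 : PySem.List.pySetD lines index ("# " ++ line0) = pvCommentPass lines index (index + 1) := by
    have := pvCP_succ lines index 0 line0 hm0 (by rw [h00]; exact hg0)
    rw [h00] at this
    rw [pvCP_zero] at this
    exact this.symm
  rw [hset1]
  by_cases hc : n2 ≤ 0
  · rw [if_pos hc] at hscan
    simp only [Option.some.injEq, Prod.mk.injEq] at hscan
    obtain ⟨rfl, rfl⟩ := hscan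
    rw [pvALoop_nonpos (2 * lines.length + 1) _ n2 _ line0 hc]
  · rw [if_neg hc] at hscan
    have hF' : F' = 2 * lines.length + 1 := by omega
    rw [hF'] at hscan
    have := pvAlign lines index (2 * lines.length + 1) n2 1 line0 lout e (by omega)
      (by rw [show index + ((1:Nat):Int) = index + 1 by push_cast; ring]; exact hscan) he
    rw [show index + ((1:Nat):Int) = index + 1 by push_cast; ring] at this
    exact this
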